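-- pv_equiv track=rewrite | github.com/akougkas/pythia | evaluation_bench/workloads/sdp/generate_requests.py | determine_agent_pipeline
-- ===== SOURCE A (Python) =====
-- def determine_agent_pipeline(task: dict) -> list[str]:
--     """Determine which agents are needed based on task structure.
--
--     SDP pipelines use different agents than HPC-CG:
--     - data_discovery: find and load relevant datasets
--     - data_wrangler: clean, transform, join data
--     - analyst: statistical analysis and computation
--     - reporter: summarize findings, produce answer
--     """
--     subtasks = task.get("subtasks", [])
--     n_sources = len(task.get("data_sources", []))
--     steps = [st.get("step", "").lower() for st in subtasks]
--
--     agents = []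
--
--     # Always need discovery if multiple sources
--     if n_sources > 1 or any("load" in s or "read" in s or "find" in s for s in steps):
--         agents.append("data_discovery")
--
--     # Wrangling if cleaning/transforming
--     if any(kw in " ".join(steps) for kw in ["clean", "transform", "convert", "merge",
--                                               "join", "filter", "dissolve", "parse", "wrangle"]):
--         agents.append("data_wrangler")
--
--     # Analysis if computation
--     if any(kw in " ".join(steps) for kw in ["compute", "calculate", "sum", "average",
--                                               "count", "correlat", "regress", "statistic",
--                                               "sort", "rank", "compare"]):
--         agents.append("analyst")
--
--     # Always need reporter for final answer
--     agents.append("reporter")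
--
--     # Minimum 2 agents
--     if len(agents) < 2:
--         agents.insert(0, "data_discovery")
--
--     return agents
-- ===== SOURCE B (Python) =====
-- # Table-driven reimplementation: one keyword->bit table scanned once over the
-- # steps builds a 3-bit mask; the final pipeline is a plain lookup in a
-- # precomputed table of the 8 possible pipelines (the minimum-2 rule is already
-- # baked into entry 0), so no agent assembly or fallback branching happens at
-- # run time.
-- _DISCOVERY = ("load", "read", "find")
-- _WRANGLER = ("clean", "transform", "convert", "merge", "join",
--              "filter", "dissolve", "parse", "wrangle")
-- _ANALYST = ("compute", "calculate", "sum", "average", "count",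
--             "correlat", "regress", "statistic", "sort", "rank", "compare")
--
-- _KW_BITS = [(k, 1) for k in _DISCOVERY] \
--     + [(k, 2) for k in _WRANGLER] \
--     + [(k, 4) for k in _ANALYST]
--
-- # pipeline for every mask d=1, w=2, a=4 (mask 0 already has the min-2 fixup)
-- _PIPELINES = [
--     ["data_discovery", "reporter"],                              # 0
--     ["data_discovery", "reporter"],                              # 1
--     ["data_wrangler", "reporter"],                               # 2
--     ["data_discovery", "data_wrangler", "reporter"],             # 3
--     ["analyst", "reporter"],                                     # 4
--     ["data_discovery", "analyst", "reporter"],                   # 5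
--     ["data_wrangler", "analyst", "reporter"],                    # 6
--     ["data_discovery", "data_wrangler", "analyst", "reporter"],  # 7
-- ]
--
--
-- def determine_agent_pipeline(task: dict) -> list[str]:
--     mask = 1 if len(task.get("data_sources", [])) > 1 else 0
--     for st in task.get("subtasks", []):
--         s = st.get("step", "").lower()
--         for kw, bit in _KW_BITS:
--             if kw in s:
--                 mask |= bit
--     return list(_PIPELINES[mask])
-- ===== Notes on version B (the rewrite author's own statement) =====
-- stated objective: alternative
-- what changed: Replaces A's three separate any-scans (two of which rebuild the space-joined step text for every keyword) and its branch-by-branch agent assembly with append/insert fallback by a table-driven formulation: a single flat keyword-to-bit table scanned once per step builds a 3-bit mask, and the result is a lookup of the mask in a precomputed table of the 8 possible pipelines with the minimum-2 rule baked into entry 0; correct because no keyword contains a space, so per-step substring tests equal tests on the joined text.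
import Mathlib
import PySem

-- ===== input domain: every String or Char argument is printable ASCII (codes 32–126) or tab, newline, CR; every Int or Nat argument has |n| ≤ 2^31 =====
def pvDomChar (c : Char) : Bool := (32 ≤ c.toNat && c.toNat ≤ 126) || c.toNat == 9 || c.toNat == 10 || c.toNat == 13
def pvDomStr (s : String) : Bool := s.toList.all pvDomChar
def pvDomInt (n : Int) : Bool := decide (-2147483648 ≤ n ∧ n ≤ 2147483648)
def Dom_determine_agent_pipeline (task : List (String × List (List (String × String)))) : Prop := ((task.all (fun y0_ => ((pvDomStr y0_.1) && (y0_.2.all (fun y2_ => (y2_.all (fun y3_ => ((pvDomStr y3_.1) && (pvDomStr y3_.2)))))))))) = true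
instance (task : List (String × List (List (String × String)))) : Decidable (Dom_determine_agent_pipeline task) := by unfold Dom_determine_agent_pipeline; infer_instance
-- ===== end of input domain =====

-- B is table-driven: one keyword→bit table scanned once per step builds a 3-bit mask and
-- the pipeline is looked up in a precomputed table of the 8 possible pipelines (the
-- minimum-2 rule baked into entry 0); equivalent because no keyword contains a space
-- (objective: alternative).

-- ===== PORT A =====
def determine_agent_pipeline (task : List (String × List (List (String × String)))) : List String :=
  let subtasks := (PySem.Dict.mk task).getD "subtasks" []
  let n_sources := PySem.List.len ((PySem.Dict.mk task).getD "data_sources" [])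
  let steps := subtasks.map (fun st => PySem.Str.lower ((PySem.Dict.mk st).getD "step" ""))
  let agents : List String := []
  let agents := if n_sources > 1 ∨ steps.any (fun s => PySem.Str.isIn "load" s || PySem.Str.isIn "read" s || PySem.Str.isIn "find" s)
    then agents ++ ["data_discovery"] else agents
  let agents := if (["clean", "transform", "convert", "merge", "join", "filter", "dissolve", "parse", "wrangle"].any
      (fun kw => PySem.Str.isIn kw (PySem.Str.join " " steps)))
    then agents ++ ["data_wrangler"] else agents
  let agents := if (["compute", "calculate", "sum", "average", "count", "correlat", "regress", "statistic", "sort", "rank", "compare"].any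
      (fun kw => PySem.Str.isIn kw (PySem.Str.join " " steps)))
    then agents ++ ["analyst"] else agents
  let agents := agents ++ ["reporter"]
  if PySem.List.len agents < 2 then PySem.List.insert agents 0 "data_discovery" else agents

-- ===== PORT B =====
def pvDiscoveryKws : List String := ["load", "read", "find"]
def pvWranglerKws : List String := ["clean", "transform", "convert", "merge", "join", "filter", "dissolve", "parse", "wrangle"]
def pvAnalystKws : List String := ["compute", "calculate", "sum", "average", "count", "correlat", "regress", "statistic", "sort", "rank", "compare"]

def pvKwBits : List (String × Nat) :=
  pvDiscoveryKws.map (fun k => (k, 1)) ++ pvWranglerKws.map (fun k => (k, 2)) ++ pvAnalystKws.map (fun k => (k, 4))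

def pvPipelines : List (List String) :=
  [["data_discovery", "reporter"],
   ["data_discovery", "reporter"],
   ["data_wrangler", "reporter"],
   ["data_discovery", "data_wrangler", "reporter"],
   ["analyst", "reporter"],
   ["data_discovery", "analyst", "reporter"],
   ["data_wrangler", "analyst", "reporter"],
   ["data_discovery", "data_wrangler", "analyst", "reporter"]]

def determine_agent_pipeline_alt (task : List (String × List (List (String × String)))) : List String :=
  let mask0 : Nat := if PySem.List.len ((PySem.Dict.mk task).getD "data_sources" []) > 1 then 1 else 0
  let mask := ((PySem.Dict.mk task).getD "subtasks" []).foldl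
    (fun m st =>
      let s := PySem.Str.lower ((PySem.Dict.mk st).getD "step" "")
      pvKwBits.foldl (fun m kb => if PySem.Str.isIn kb.1 s then m ||| kb.2 else m) m)
    mask0
  -- mask < 8 always, so the Python index _PIPELINES[mask] is in range; List.getD is exact here
  pvPipelines.getD mask []

-- ===== PRECONDITION & SPEC =====
def Spec_determine_agent_pipeline (task : List (String × List (List (String × String)))) (out : List String) : Prop := out = determine_agent_pipeline_alt task
instance (task : List (String × List (List (String × String)))) (out : List String) : Decidable (Spec_determine_agent_pipeline task out) := by unfold Spec_determine_agent_pipeline; infer_instance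

-- ===== CLAIM (what is proved, stated in full; the proofs are below) =====
def Claim_equal_determine_agent_pipeline : Prop := ∀ (task : List (String × List (List (String × String)))), Dom_determine_agent_pipeline task → Spec_determine_agent_pipeline task (determine_agent_pipeline task)

-- ===== LEMMAS AND PROOFS =====

-- any prefix of a ++ c :: b that avoids c is a prefix of a
lemma pv_prefix_avoid {α : Type} (c : α) (kw a b : List α)
    (hc : c ∉ kw) (h : kw <+: a ++ c :: b) : kw <+: a := by
  induction a generalizing kw with
  | nil =>
    cases kw with
    | nil => exact List.nil_prefix
    | cons k kw' =>
      simp only [List.nil_append, List.cons_prefix_cons] at h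
      exact absurd (h.1 ▸ List.mem_cons_self) hc
  | cons x a' ih =>
    cases kw with
    | nil => exact List.nil_prefix
    | cons k kw' =>
      simp only [List.cons_append, List.cons_prefix_cons] at h ⊢
      exact ⟨h.1, ih kw' (fun hm => hc (List.mem_cons_of_mem _ hm)) h.2⟩

-- an infix of a ++ c :: b that avoids c lies inside a or inside b
lemma pv_infix_split {α : Type} (c : α) (kw a b : List α) (hc : c ∉ kw) :
    kw <:+: a ++ c :: b ↔ kw <:+: a ∨ kw <:+: b := by
  induction a with
  | nil =>
    simp only [List.nil_append, List.infix_cons_iff]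
    constructor
    · rintro (h | h)
      · left
        have := pv_prefix_avoid c kw [] b hc h
        simp only [List.prefix_nil] at this
        simp [this]
      · exact Or.inr h
    · rintro (h | h)
      · rcases List.infix_nil.mp h with rfl
        exact Or.inl List.nil_prefix
      · exact Or.inr h
  | cons x a' ih =>
    rw [List.cons_append, List.infix_cons_iff, ih, List.infix_cons_iff]
    constructor
    · rintro (h | h | h)
      · exact Or.inl (Or.inl (pv_prefix_avoid c kw (x :: a') b hc h))
      · exact Or.inl (Or.inr h)
      · exact Or.inr h
    · rintro ((h | h) | h)
      · exact Or.inl (h.trans (List.prefix_append _ _))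
      · exact Or.inr (Or.inl h)
      · exact Or.inr (Or.inr h)

-- a nonempty space-free word occurs in the space-joined parts iff it occurs in one part
lemma pv_infix_join (kw : List Char) (hne : kw ≠ []) (hs : ' ' ∉ kw) :
    ∀ parts : List (List Char),
      (kw <:+: PySem.Chars.join [' '] parts ↔ ∃ p ∈ parts, kw <:+: p) := by
  intro parts
  induction parts with
  | nil => simp [PySem.Chars.join_nil, List.infix_nil, hne]
  | cons p rest ih =>
    cases rest with
    | nil => simp [PySem.Chars.join_singleton]
    | cons q r =>
      rw [PySem.Chars.join_cons_cons, List.append_assoc, List.singleton_append,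
        pv_infix_split ' ' kw p _ hs, ih]
      simp only [List.mem_cons]
      constructor
      · rintro (h | ⟨s, hm, h⟩)
        · exact ⟨p, Or.inl rfl, h⟩
        · exact ⟨s, Or.inr hm, h⟩
      · rintro ⟨s, (rfl | hm), h⟩
        · exact Or.inl h
        · exact Or.inr ⟨s, hm, h⟩

lemma pv_isIn_join (kw : String) (hne : kw.toList ≠ []) (hs : ' ' ∉ kw.toList) (steps : List String) :
    (PySem.Str.isIn kw (PySem.Str.join " " steps) = true) ↔ ∃ s ∈ steps, PySem.Str.isIn kw s = true := by
  rw [PySem.Str.isIn_iff_infix, PySem.Str.toList_join]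
  have : (" " : String).toList = [' '] := rfl
  rw [this, pv_infix_join kw.toList hne hs]
  simp only [List.mem_map]
  constructor
  · rintro ⟨p, ⟨s, hm, rfl⟩, h⟩
    exact ⟨s, hm, (PySem.Str.isIn_iff_infix _ _).mpr h⟩
  · rintro ⟨s, hm, h⟩
    exact ⟨s.toList, ⟨s, hm, rfl⟩, (PySem.Str.isIn_iff_infix _ _).mp h⟩

-- a keyword scan over the joined text equals a per-step scan of the keyword list
lemma pv_any_join_eq (kws : List String)
    (hk : ∀ kw ∈ kws, kw.toList ≠ [] ∧ ' ' ∉ kw.toList)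
    (steps : List String) :
    (kws.any (fun kw => PySem.Str.isIn kw (PySem.Str.join " " steps)))
      = (steps.any (fun s => kws.any (fun k => PySem.Str.isIn k s))) := by
  rw [Bool.eq_iff_iff]
  simp only [List.any_eq_true]
  constructor
  · rintro ⟨kw, hkw, h⟩
    obtain ⟨s, hm, h⟩ := (pv_isIn_join kw (hk kw hkw).1 (hk kw hkw).2 steps).mp h
    exact ⟨s, hm, kw, hkw, h⟩
  · rintro ⟨s, hm, kw, hkw, h⟩
    exact ⟨kw, hkw, (pv_isIn_join kw (hk kw hkw).1 (hk kw hkw).2 steps).mpr ⟨s, hm, h⟩⟩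

-- factor the accumulator out of a fold that only or-s into it
lemma pv_foldl_lor_factor {α : Type} (g : α → Nat) (l : List α) (m : Nat) :
    l.foldl (fun m x => m ||| g x) m = m ||| l.foldl (fun m x => m ||| g x) 0 := by
  induction l generalizing m with
  | nil => simp
  | cons x xs ih =>
    simp only [List.foldl_cons]
    rw [ih (m ||| g x), ih (0 ||| g x)]
    simp [Nat.or_assoc]

-- the inner keyword fold, with the branch pushed into the or-term
lemma pv_inner_fold_eq (t : List (String × Nat)) (s : String) (m : Nat) :
    t.foldl (fun m kb => if PySem.Str.isIn kb.1 s then m ||| kb.2 else m) m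
      = t.foldl (fun m kb => m ||| (if PySem.Str.isIn kb.1 s then kb.2 else 0)) m := by
  induction t generalizing m with
  | nil => rfl
  | cons kb t ih => simp only [List.foldl_cons]; rw [ih]; split <;> simp

-- one same-bit segment of the keyword table computes its bit iff some keyword matches
lemma pv_seg_fold (kws : List String) (b : Nat) (s : String) :
    (kws.map (fun k => (k, b))).foldl (fun m kb => m ||| (if PySem.Str.isIn kb.1 s then kb.2 else 0)) 0
      = if kws.any (fun k => PySem.Str.isIn k s) then b else 0 := by
  induction kws with
  | nil => simp
  | cons k kws ih =>
    simp only [List.map_cons, List.foldl_cons, List.any_cons]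
    rw [pv_foldl_lor_factor, ih]
    by_cases hb : PySem.Str.isIn k s = true
    · by_cases hb2 : (kws.any fun k => PySem.Str.isIn k s) = true
      · simp only [hb, hb2]; simp
      · rw [Bool.not_eq_true] at hb2; simp only [hb, hb2]; simp
    · rw [Bool.not_eq_true] at hb
      by_cases hb2 : (kws.any fun k => PySem.Str.isIn k s) = true
      · simp only [hb, hb2]; simp
      · rw [Bool.not_eq_true] at hb2; simp only [hb, hb2]; simp

-- the whole keyword table fold for one step, as three bit-ifs
lemma pv_step_mask (s : String) :
    pvKwBits.foldl (fun m kb => if PySem.Str.isIn kb.1 s then m ||| kb.2 else m) 0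
      = (if pvDiscoveryKws.any (fun k => PySem.Str.isIn k s) then 1 else 0)
        ||| (if pvWranglerKws.any (fun k => PySem.Str.isIn k s) then 2 else 0)
        ||| (if pvAnalystKws.any (fun k => PySem.Str.isIn k s) then 4 else 0) := by
  rw [pv_inner_fold_eq]
  show ((pvDiscoveryKws.map (fun k => (k, 1)) ++ pvWranglerKws.map (fun k => (k, 2)) ++ pvAnalystKws.map (fun k => (k, 4))).foldl _ 0) = _
  rw [List.foldl_append, List.foldl_append, pv_seg_fold,
    pv_foldl_lor_factor, pv_seg_fold, pv_foldl_lor_factor, pv_seg_fold]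

-- merging two per-step bit masks or-s the flags
lemma pv_lor_bits (x1 x2 x3 y1 y2 y3 : Bool) :
    (((if x1 then 1 else 0) ||| (if x2 then 2 else 0) ||| (if x3 then 4 else 0) : Nat)
      ||| ((if y1 then 1 else 0) ||| (if y2 then 2 else 0) ||| (if y3 then 4 else 0)))
    = ((if x1 || y1 then 1 else 0) ||| (if x2 || y2 then 2 else 0) ||| (if x3 || y3 then 4 else 0)) := by
  cases x1 <;> cases x2 <;> cases x3 <;> cases y1 <;> cases y2 <;> cases y3 <;> decide

-- the fold over the subtasks computes the three any-flags as a bit mask or-ed onto the start mask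
lemma pv_steps_fold {α : Type} (f : α → String) (l : List α) (m0 : Nat) :
    l.foldl
      (fun m st =>
        pvKwBits.foldl (fun m kb => if PySem.Str.isIn kb.1 (f st) then m ||| kb.2 else m) m)
      m0
      = (m0 ||| ((if l.any (fun st => pvDiscoveryKws.any (fun k => PySem.Str.isIn k (f st))) then 1 else 0)
         ||| (if l.any (fun st => pvWranglerKws.any (fun k => PySem.Str.isIn k (f st))) then 2 else 0)
         ||| (if l.any (fun st => pvAnalystKws.any (fun k => PySem.Str.isIn k (f st))) then 4 else 0))) := by
  induction l generalizing m0 with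
  | nil => simp
  | cons s l ih =>
    simp only [List.foldl_cons, List.any_cons]
    rw [pv_inner_fold_eq, pv_foldl_lor_factor, ← pv_inner_fold_eq, pv_step_mask, ih,
      Nat.or_assoc m0, pv_lor_bits]
    rfl

-- ===== VERDICT (by name: the statement is the Claim_ definition above) =====
set_option maxHeartbeats 1000000 in
theorem determine_agent_pipeline_spec : Claim_equal_determine_agent_pipeline := by
  intro task _
  unfold Spec_determine_agent_pipeline
  show determine_agent_pipeline task = determine_agent_pipeline_alt task
  simp only [determine_agent_pipeline, determine_agent_pipeline_alt]
  rw [pv_steps_fold]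
  simp only [
    pv_any_join_eq ["clean", "transform", "convert", "merge", "join", "filter", "dissolve", "parse", "wrangle"] (by decide),
    pv_any_join_eq ["compute", "calculate", "sum", "average", "count", "correlat", "regress", "statistic", "sort", "rank", "compare"] (by decide),
    List.any_map, Function.comp_def]
  have hd : ∀ s : String,
      (pvDiscoveryKws.any (fun k => PySem.Str.isIn k s))
        = (PySem.Str.isIn "load" s || PySem.Str.isIn "read" s || PySem.Str.isIn "find" s) := by
    intro s; simp [pvDiscoveryKws, Bool.or_assoc]
  have hw : ∀ s : String,
      (pvWranglerKws.any (fun k => PySem.Str.isIn k s))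
        = (["clean", "transform", "convert", "merge", "join", "filter", "dissolve", "parse", "wrangle"].any
            (fun k => PySem.Str.isIn k s)) := by
    intro s; rfl
  have ha : ∀ s : String,
      (pvAnalystKws.any (fun k => PySem.Str.isIn k s))
        = (["compute", "calculate", "sum", "average", "count", "correlat", "regress", "statistic", "sort", "rank", "compare"].any
            (fun k => PySem.Str.isIn k s)) := by
    intro s; rfl
  simp only [hd, hw, ha]
  by_cases h1 : PySem.List.len ((PySem.Dict.mk task).getD "data_sources" []) > 1 <;>
    by_cases h2 : ((PySem.Dict.mk task).getD "subtasks" []).any (fun st =>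
        PySem.Str.isIn "load" (PySem.Str.lower ((PySem.Dict.mk st).getD "step" ""))
        || PySem.Str.isIn "read" (PySem.Str.lower ((PySem.Dict.mk st).getD "step" ""))
        || PySem.Str.isIn "find" (PySem.Str.lower ((PySem.Dict.mk st).getD "step" ""))) = true <;>
    by_cases h3 : ((PySem.Dict.mk task).getD "subtasks" []).any (fun st =>
        (["clean", "transform", "convert", "merge", "join", "filter", "dissolve", "parse", "wrangle"].any
          (fun k => PySem.Str.isIn k (PySem.Str.lower ((PySem.Dict.mk st).getD "step" ""))))) = true <;>
    by_cases h4 : ((PySem.Dict.mk task).getD "subtasks" []).any (fun st =>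
        (["compute", "calculate", "sum", "average", "count", "correlat", "regress", "statistic", "sort", "rank", "compare"].any
          (fun k => PySem.Str.isIn k (PySem.Str.lower ((PySem.Dict.mk st).getD "step" ""))))) = true <;>
    (simp only [h1, h2, h3, h4]; decide)
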